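-- pv_equiv track=rewrite | github.com/Rudedaisy/SCALE-Sim | OLDloadData.py | squeezeCoeffIdxOnce
-- ===== SOURCE A (Python) =====
-- def squeezeCoeffIdxOnce(coeff_ptrs_layer, chunks, array_w, in_len):
--     # chunks: [out_channel_start, out_chanel_end+1]
--     assert max(chunks) >= len(coeff_ptrs_layer)
--
--     # keep track of pruning performance
--     tot_pruned = 0
--     tot_rounds = 0
--
--     sq_ptrs = []
--     for chunk_idx in range(len(chunks) - 1):
--         assert array_w >= (chunks[chunk_idx + 1] - chunks[chunk_idx]), "Issue: {} vs {}".format(chunks[chunk_idx + 1], chunks[chunk_idx])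
--
--         chunk_ptrs = []
--         for in_idx in range(in_len):
--             if any(in_idx in sublist for sublist in coeff_ptrs_layer[chunks[chunk_idx]:chunks[chunk_idx + 1]]):
--                 chunk_ptrs.append(in_idx)
--                 tot_rounds += 1
--             #else:
--             #    tot_pruned += 1
--         sq_ptrs.append(chunk_ptrs)
--
--     #score = tot_pruned / len(chunks - 1)
--     score = tot_rounds
--     return sq_ptrs, score
-- ===== SOURCE B (Python) =====
-- def squeezeCoeffIdxOnce(coeff_ptrs_layer, chunks, array_w, in_len):
--     # chunks: [out_channel_start, out_chanel_end+1]
--     assert max(chunks) >= len(coeff_ptrs_layer)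
--
--     bounds = list(zip(chunks, chunks[1:]))
--     for lo, hi in bounds:
--         assert array_w >= hi - lo, "Issue: {} vs {}".format(hi, lo)
--
--     sq_ptrs = [sorted({e for sub in coeff_ptrs_layer[lo:hi] for e in sub
--                        if 0 <= e < in_len})
--                for lo, hi in bounds]
--     return sq_ptrs, sum(len(p) for p in sq_ptrs)
-- ===== Notes on version B (the rewrite author's own statement) =====
-- stated objective: faster
-- what changed: B iterates over zip(chunks, chunks[1:]) instead of indexing by range, builds each chunk list by a set comprehension over the slice's elements (filtered to [0, in_len)) followed by a sort instead of testing every candidate in range(in_len) against every sublist, and computes the score as a final sum of lengths instead of a running counter.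
import Mathlib
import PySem

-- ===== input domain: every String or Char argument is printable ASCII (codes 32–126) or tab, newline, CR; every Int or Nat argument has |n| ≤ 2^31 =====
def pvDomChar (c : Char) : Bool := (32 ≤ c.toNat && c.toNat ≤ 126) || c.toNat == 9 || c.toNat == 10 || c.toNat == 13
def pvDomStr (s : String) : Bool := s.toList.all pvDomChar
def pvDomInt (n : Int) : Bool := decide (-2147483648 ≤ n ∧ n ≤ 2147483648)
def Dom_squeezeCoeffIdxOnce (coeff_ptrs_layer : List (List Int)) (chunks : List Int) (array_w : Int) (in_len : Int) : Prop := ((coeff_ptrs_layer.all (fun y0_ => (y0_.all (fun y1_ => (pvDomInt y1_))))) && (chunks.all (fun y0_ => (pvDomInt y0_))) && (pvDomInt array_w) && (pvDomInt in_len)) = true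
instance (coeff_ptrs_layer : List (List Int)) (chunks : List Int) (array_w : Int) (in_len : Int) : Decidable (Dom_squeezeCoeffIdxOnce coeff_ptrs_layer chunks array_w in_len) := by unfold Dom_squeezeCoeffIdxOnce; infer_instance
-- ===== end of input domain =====

-- B replaces A's indexed loop + per-candidate range scan by zipped chunk bounds, a set
-- comprehension collecting the in-range elements of each slice, a sort, and a final sum of
-- lengths (objective: faster; same return value on all inputs where A returns).


-- ===== PORT A =====
def squeezeCoeffIdxOnce (coeff_ptrs_layer : List (List Int)) (chunks : List Int) (array_w : Int) (in_len : Int) : List (List Int) × Int :=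
  -- asserts are raising statements: excluded by Pre_; array_w appears only in an assert
  let _ := array_w
  let r := (PySem.List.pyRange 0 ((chunks.length : Int) - 1) 1).foldl
    (fun (acc : List (List Int) × Int) chunk_idx =>
      let sub := PySem.List.slice coeff_ptrs_layer
        (some (PySem.List.pyGetD chunks chunk_idx 0))
        (some (PySem.List.pyGetD chunks (chunk_idx + 1) 0))
      let inner := (PySem.List.pyRange 0 in_len 1).foldl
        (fun (st : List Int × Int) in_idx =>
          if sub.any (fun sublist => sublist.contains in_idx) then (st.1 ++ [in_idx], st.2 + 1)
          else st)
        ([], acc.2)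
      (acc.1 ++ [inner.1], inner.2))
    ([], 0)
  (r.1, r.2)

-- ===== PORT B =====
def squeezeCoeffIdxOnce_alt (coeff_ptrs_layer : List (List Int)) (chunks : List Int) (array_w : Int) (in_len : Int) : List (List Int) × Int :=
  let _ := array_w  -- array_w appears only in an assert
  let bounds := List.zip chunks (PySem.List.slice chunks (some 1) none)
  let sq_ptrs := bounds.map (fun p =>
    PySem.List.sorted
      (PySem.Set.ofList
        (((PySem.List.slice coeff_ptrs_layer (some p.1) (some p.2)).flatMap id).filter
          (fun e => decide (0 ≤ e) && decide (e < in_len))))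
      (fun x => x) false)
  (sq_ptrs, (sq_ptrs.map (fun p => (p.length : Int))).sum)

-- ===== PRECONDITION & SPEC =====
-- Pre_ excludes exactly the inputs where A raises: empty chunks (ValueError from max([])),
-- max(chunks) < len(coeff_ptrs_layer), and array_w smaller than some chunk width (AssertionError).
def Pre_squeezeCoeffIdxOnce (coeff_ptrs_layer : List (List Int)) (chunks : List Int) (array_w : Int) (in_len : Int) : Prop :=
  chunks ≠ [] ∧ (∃ c ∈ chunks, (coeff_ptrs_layer.length : Int) ≤ c) ∧
  ∀ i < chunks.length - 1, array_w ≥ chunks.getD (i + 1) 0 - chunks.getD i 0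
instance (coeff_ptrs_layer : List (List Int)) (chunks : List Int) (array_w : Int) (in_len : Int) : Decidable (Pre_squeezeCoeffIdxOnce coeff_ptrs_layer chunks array_w in_len) := by unfold Pre_squeezeCoeffIdxOnce; infer_instance

def pvWitness_squeezeCoeffIdxOnce : List (List Int) × List Int × Int × Int := ([[0]], [0, 1], 1, 1)

def Spec_squeezeCoeffIdxOnce (coeff_ptrs_layer : List (List Int)) (chunks : List Int) (array_w : Int) (in_len : Int) (out : List (List Int) × Int) : Prop := out = squeezeCoeffIdxOnce_alt coeff_ptrs_layer chunks array_w in_len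
instance (coeff_ptrs_layer : List (List Int)) (chunks : List Int) (array_w : Int) (in_len : Int) (out : List (List Int) × Int) : Decidable (Spec_squeezeCoeffIdxOnce coeff_ptrs_layer chunks array_w in_len out) := by unfold Spec_squeezeCoeffIdxOnce; infer_instance

-- ===== CLAIM (what is proved, stated in full; the proofs are below) =====
def Claim_equal_squeezeCoeffIdxOnce : Prop := ∀ (coeff_ptrs_layer : List (List Int)) (chunks : List Int) (array_w : Int) (in_len : Int), Dom_squeezeCoeffIdxOnce coeff_ptrs_layer chunks array_w in_len → Pre_squeezeCoeffIdxOnce coeff_ptrs_layer chunks array_w in_len → Spec_squeezeCoeffIdxOnce coeff_ptrs_layer chunks array_w in_len (squeezeCoeffIdxOnce coeff_ptrs_layer chunks array_w in_len)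

-- ===== LEMMAS AND PROOFS =====

-- A's inner loop appends the filtered candidates and counts them
lemma foldl_append_countIf (c : Int → Bool) : ∀ (xs : List Int) (l0 : List Int) (r0 : Int),
    xs.foldl (fun (st : List Int × Int) i => if c i then (st.1 ++ [i], st.2 + 1) else st) (l0, r0)
      = (l0 ++ xs.filter c, r0 + ((xs.filter c).length : Int)) := by
  intro xs
  induction xs with
  | nil => simp
  | cons x tl ih =>
    intro l0 r0
    simp only [List.foldl_cons]
    by_cases h : c x
    · simp [h, ih, List.filter_cons_of_pos h]
      ring
    · simp [h, ih, List.filter_cons_of_neg (by simpa using h)]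

-- per chunk: sorted(collected in-range elements as a set) = range-filter list
lemma chunk_eq (il : Int) (sub : List (List Int)) :
    PySem.List.sorted
      (PySem.Set.ofList ((sub.flatMap id).filter (fun e => decide (0 ≤ e) && decide (e < il))))
      (fun x => x) false
    = (PySem.List.pyRange 0 il 1).filter (fun i => sub.any (fun sl => sl.contains i)) := by
  apply PySem.List.sorted_eq_of_perm_of_pairwise_lt
  · rw [List.perm_ext_iff_of_nodup]
    · intro y
      simp only [List.mem_filter, PySem.List.mem_pyRange_one, List.any_eq_true,
        PySem.Set.mem_ofList, List.mem_flatMap, id_eq, Bool.and_eq_true, decide_eq_true_eq,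
        List.contains_iff_mem]
      tauto
    · exact (List.Pairwise.sublist List.filter_sublist (PySem.List.pairwise_lt_pyRange_one 0 il)).imp ne_of_lt
    · exact PySem.Set.nodup_ofList _
  · exact List.Pairwise.sublist List.filter_sublist (PySem.List.pairwise_lt_pyRange_one 0 il)

-- A's outer loop: append each chunk list and add its length
lemma foldl_snoc_sumlen (g : Int → List Int) : ∀ (xs : List Int) (l0 : List (List Int)) (r0 : Int),
    xs.foldl (fun (acc : List (List Int) × Int) i => (acc.1 ++ [g i], acc.2 + ((g i).length : Int))) (l0, r0)
      = (l0 ++ xs.map g, r0 + ((xs.map g).map (fun p => (p.length : Int))).sum) := by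
  intro xs
  induction xs with
  | nil => simp
  | cons x tl ih =>
    intro l0 r0
    simp [ih, add_assoc]

-- indexed iteration over range(len(chunks)-1) = iteration over zip(chunks, chunks[1:])
lemma map_range_eq_map_zip (chunks : List Int) (F : Int → Int → List Int) :
    (PySem.List.pyRange 0 ((chunks.length : Int) - 1) 1).map
        (fun i => F (PySem.List.pyGetD chunks i 0) (PySem.List.pyGetD chunks (i + 1) 0))
      = (List.zip chunks chunks.tail).map (fun p => F p.1 p.2) := by
  apply List.ext_getElem
  · simp [PySem.List.length_pyRange_one, List.length_tail]
  · intro k h1 h2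
    have hk : k < chunks.length - 1 := by
      simp [PySem.List.length_pyRange_one] at h1
      omega
    simp only [List.getElem_map, PySem.List.getElem_pyRange_one, List.getElem_zip, List.getElem_tail]
    have e2 : ((k : Int) + 1) = (((k + 1) : Nat) : Int) := by push_cast; ring
    rw [zero_add, e2, PySem.List.pyGetD_natCast, PySem.List.pyGetD_natCast,
        List.getD_eq_getElem _ _ (by omega), List.getD_eq_getElem _ _ (by omega)]

-- ===== VERDICT (by name: the statement is the Claim_ definition above) =====
theorem squeezeCoeffIdxOnce_spec : Claim_equal_squeezeCoeffIdxOnce := by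
  intro coeff_ptrs_layer chunks array_w in_len _hdom _hpre
  show _ = _
  unfold squeezeCoeffIdxOnce squeezeCoeffIdxOnce_alt
  simp only [PySem.List.slice_from_one]
  have hf :
      (fun (acc : List (List Int) × Int) chunk_idx =>
        let sub := PySem.List.slice coeff_ptrs_layer
          (some (PySem.List.pyGetD chunks chunk_idx 0))
          (some (PySem.List.pyGetD chunks (chunk_idx + 1) 0))
        let inner := (PySem.List.pyRange 0 in_len 1).foldl
          (fun (st : List Int × Int) in_idx =>
            if sub.any (fun sublist => sublist.contains in_idx) then (st.1 ++ [in_idx], st.2 + 1)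
            else st)
          ([], acc.2)
        (acc.1 ++ [inner.1], inner.2))
      =
      (fun (acc : List (List Int) × Int) chunk_idx =>
        (acc.1 ++ [PySem.List.sorted
            (PySem.Set.ofList
              (((PySem.List.slice coeff_ptrs_layer
                  (some (PySem.List.pyGetD chunks chunk_idx 0))
                  (some (PySem.List.pyGetD chunks (chunk_idx + 1) 0))).flatMap id).filter
                (fun e => decide (0 ≤ e) && decide (e < in_len))))
            (fun x => x) false],
         acc.2 + ((PySem.List.sorted
            (PySem.Set.ofList
              (((PySem.List.slice coeff_ptrs_layer
                  (some (PySem.List.pyGetD chunks chunk_idx 0))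
                  (some (PySem.List.pyGetD chunks (chunk_idx + 1) 0))).flatMap id).filter
                (fun e => decide (0 ≤ e) && decide (e < in_len))))
            (fun x => x) false).length : Int))) := by
    funext acc chunk_idx
    simp only [foldl_append_countIf, chunk_eq, List.nil_append]
  rw [hf]
  rw [foldl_snoc_sumlen (fun i => PySem.List.sorted
        (PySem.Set.ofList
          (((PySem.List.slice coeff_ptrs_layer
              (some (PySem.List.pyGetD chunks i 0))
              (some (PySem.List.pyGetD chunks (i + 1) 0))).flatMap id).filter
            (fun e => decide (0 ≤ e) && decide (e < in_len))))
        (fun x => x) false)]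
  rw [map_range_eq_map_zip chunks (fun a b => PySem.List.sorted
        (PySem.Set.ofList
          (((PySem.List.slice coeff_ptrs_layer (some a) (some b)).flatMap id).filter
            (fun e => decide (0 ≤ e) && decide (e < in_len))))
        (fun x => x) false)]
  simp
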